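-- pv_equiv track=rewrite | github.com/muqiao215/web-api | packages/prompt-factory/prompt_factory/meta_prompt.py | _find_json_object_bounds
-- ===== SOURCE A (Python) =====
-- def _find_json_object_bounds(raw_text: str, anchor: int) -> tuple[int, int]:
--     object_stack: list[int] = []
--     in_string = False
--     escaped = False
--
--     for index, char in enumerate(raw_text):
--         if in_string:
--             if escaped:
--                 escaped = False
--             elif char == "\\":
--                 escaped = True
--             elif char == '"':
--                 in_string = False
--         else:
--             if char == '"':
--                 in_string = True
--             elif char == "{":
--                 object_stack.append(index)
--             elif char == "}":
--                 if object_stack: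
--                     object_stack.pop()
--         if index >= anchor:
--             break
--
--     if not object_stack:
--         raise ValueError("could not locate JSON object start for source_id")
--
--     start = object_stack[-1]
--     depth = 0
--     in_string = False
--     escaped = False
--     for index in range(start, len(raw_text)):
--         char = raw_text[index]
--         if in_string:
--             if escaped:
--                 escaped = False
--             elif char == "\\":
--                 escaped = True
--             elif char == '"':
--                 in_string = False
--             continue
--         if char == '"':
--             in_string = True
--             continue
--         if char == "{":
--             depth += 1
--         elif char == "}":
--             depth -= 1
--             if depth == 0:
--                 return start, index + 1
--
--     raise ValueError("could not locate JSON object end for source_id")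
-- ===== SOURCE B (Python) =====
-- def _find_json_object_bounds(raw_text: str, anchor: int) -> tuple[int, int]:
--     # One forward pass: stack of open-'{' indices with a string-aware state
--     # machine; snapshot the enclosing candidate when the scan reaches anchor,
--     # then keep scanning the same pass until that brace is closed.
--     stack: list[int] = []
--     in_string = False
--     escaped = False
--     candidate = None
--     for index, char in enumerate(raw_text):
--         if in_string:
--             if escaped:
--                 escaped = False
--             elif char == "\\":
--                 escaped = True
--             elif char == '"':
--                 in_string = False
--         elif char == '"':
--             in_string = True
--         elif char == "{":
--             stack.append(index)
--         elif char == "}":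
--             if stack:
--                 stack.pop()
--             if candidate is not None and (not stack or stack[-1] < candidate):
--                 return candidate, index + 1
--         if candidate is None and index >= anchor:
--             if not stack:
--                 raise ValueError("could not locate JSON object start for source_id")
--             candidate = stack[-1]
--     if candidate is None and not stack:
--         raise ValueError("could not locate JSON object start for source_id")
--     raise ValueError("could not locate JSON object end for source_id")
-- ===== Notes on version B (the rewrite author's own statement) =====
-- stated objective: alternative
-- what changed: B collapses A's two sequential scans (one up to the anchor to find the enclosing '{', then a fresh re-scan from that '{' to find its close) into a single forward pass that snapshots the enclosing brace index when the scan reaches the anchor and keeps the same stack/string state to detect when that brace is popped.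
import Mathlib
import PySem

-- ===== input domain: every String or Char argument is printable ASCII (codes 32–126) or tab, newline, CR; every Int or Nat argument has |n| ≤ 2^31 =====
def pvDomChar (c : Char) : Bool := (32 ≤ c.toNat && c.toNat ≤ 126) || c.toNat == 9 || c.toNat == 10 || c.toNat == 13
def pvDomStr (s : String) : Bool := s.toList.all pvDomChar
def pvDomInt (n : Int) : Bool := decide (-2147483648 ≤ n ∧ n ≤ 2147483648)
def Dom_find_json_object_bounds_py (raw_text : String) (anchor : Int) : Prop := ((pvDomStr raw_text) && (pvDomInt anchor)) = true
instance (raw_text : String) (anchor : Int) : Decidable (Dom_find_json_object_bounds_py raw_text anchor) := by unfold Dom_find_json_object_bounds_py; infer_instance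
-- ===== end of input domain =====

-- B replaces A's two sequential scans by one forward pass with an anchor-time snapshot
-- of the enclosing '{' (alternative decomposition, same cost); where Python raises
-- ValueError the ports return dummy pairs and Pre_ excludes exactly those inputs.


-- ===== PORT A =====
-- A's first loop: string-aware scan keeping the stack of open-'{' indices,
-- breaking after processing the first index ≥ anchor.
def pvPass1 : List Char → Int → Int → List Int → Bool → Bool → List Int
  | [], _, _, stack, _, _ => stack
  | c :: rest, index, anchor, stack, instr, esc =>
    let st : List Int × Bool × Bool :=
      if instr then
        if esc then (stack, instr, false)
        else if c = '\\' then (stack, instr, true)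
        else if c = '"' then (stack, false, esc)
        else (stack, instr, esc)
      else
        if c = '"' then (stack, true, esc)
        else if c = '{' then (index :: stack, instr, esc)
        else if c = '}' then (stack.tail, instr, esc)   -- 'if object_stack: pop'
        else (stack, instr, esc)
    if anchor ≤ index then st.1
    else pvPass1 rest (index + 1) anchor st.1 st.2.1 st.2.2

-- A's second loop: fresh string state, depth counting from `start`.
def pvPass2 : List Char → Int → Int → Int → Bool → Bool → Int × Int
  | [], _, _, _, _, _ => (-2, -2)     -- Python: ValueError "… object end …" (outside Pre_)
  | c :: rest, index, start, depth, instr, esc =>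
    if instr then
      if esc then pvPass2 rest (index + 1) start depth instr false
      else if c = '\\' then pvPass2 rest (index + 1) start depth instr true
      else if c = '"' then pvPass2 rest (index + 1) start depth false esc
      else pvPass2 rest (index + 1) start depth instr esc
    else if c = '"' then pvPass2 rest (index + 1) start depth true esc
    else if c = '{' then pvPass2 rest (index + 1) start (depth + 1) instr esc
    else if c = '}' then
      if depth - 1 = 0 then (start, index + 1)
      else pvPass2 rest (index + 1) start (depth - 1) instr esc
    else pvPass2 rest (index + 1) start depth instr esc

def find_json_object_bounds_py (raw_text : String) (anchor : Int) : Int × Int :=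
  match pvPass1 raw_text.toList 0 anchor [] false false with
  | [] => (-1, -1)                    -- Python: ValueError "… object start …" (outside Pre_)
  | start :: _ => pvPass2 (raw_text.toList.drop start.toNat) start start 0 false false

-- ===== PORT B =====
-- B's single pass: same stack as an index list, plus the Optional snapshot `cand`;
-- the loop body first produces either an early return or the updated state, then
-- performs Source B's end-of-iteration anchor check.
def pvScan : List Char → Int → Int → List Int → Bool → Bool → Option Int → Int × Int
  | [], _, _, stack, _, _, cand =>
    if cand.isNone && stack.isEmpty then (-1, -1)      -- "… object start …"
    else (-2, -2)                                      -- "… object end …"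
  | c :: rest, index, anchor, stack, instr, esc, cand =>
    let step : (List Int × Bool × Bool) ⊕ (Int × Int) :=
      if instr then
        if esc then .inl (stack, instr, false)
        else if c = '\\' then .inl (stack, instr, true)
        else if c = '"' then .inl (stack, false, esc)
        else .inl (stack, instr, esc)
      else if c = '"' then .inl (stack, true, esc)
      else if c = '{' then .inl (index :: stack, instr, esc)
      else if c = '}' then
        let stack' := stack.tail
        match cand with
        | some cd =>
          if (match stack' with | [] => true | top :: _ => decide (top < cd)) then
            .inr (cd, index + 1)
          else .inl (stack', instr, esc)
        | none => .inl (stack', instr, esc)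
      else .inl (stack, instr, esc)
    match step with
    | .inr v => v
    | .inl (stack', instr', esc') =>
      match cand with
      | some cd => pvScan rest (index + 1) anchor stack' instr' esc' (some cd)
      | none =>
        if anchor ≤ index then
          match stack' with
          | [] => (-1, -1)                             -- "… object start …"
          | cd :: _ => pvScan rest (index + 1) anchor stack' instr' esc' (some cd)
        else pvScan rest (index + 1) anchor stack' instr' esc' none

def find_json_object_bounds_py_alt (raw_text : String) (anchor : Int) : Int × Int :=
  pvScan raw_text.toList 0 anchor [] false false none

-- ===== PRECONDITION & SPEC =====
-- Pre_ helpers: the unquoted-brace events of the text, and whether the brace opened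
-- at index cd is eventually closed.
def pvEvents : List Char → Int → Bool → Bool → List (Int × Char)
  | [], _, _, _ => []
  | c :: rest, i, ins, esc =>
    if ins then
      if esc then pvEvents rest (i + 1) ins false
      else if c = '\\' then pvEvents rest (i + 1) ins true
      else if c = '"' then pvEvents rest (i + 1) false esc
      else pvEvents rest (i + 1) ins esc
    else if c = '"' then pvEvents rest (i + 1) true esc
    else if c = '{' ∨ c = '}' then (i, c) :: pvEvents rest (i + 1) ins esc
    else pvEvents rest (i + 1) ins esc

def pvClosesFrom : List (Int × Char) → Int → Int → Bool
  | [], _, _ => false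
  | (i, c) :: rest, cd, depth =>
    if i < cd then pvClosesFrom rest cd depth
    else if c = '{' then pvClosesFrom rest cd (depth + 1)
    else if depth - 1 = 0 then true
    else pvClosesFrom rest cd (depth - 1)

-- Pre_ holds exactly when Python A returns normally: some unquoted '{' is still open
-- after the brace events up to max(anchor,0), and that brace is eventually closed.
def Pre_find_json_object_bounds_py (raw_text : String) (anchor : Int) : Prop :=
  (let ev := pvEvents raw_text.toList 0 false false
   let cut := max anchor 0
   let stack := ev.foldl
     (fun st p => if p.1 ≤ cut then (if p.2 = '{' then p.1 :: st else st.tail) else st)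
     ([] : List Int)
   match stack with
   | [] => false
   | cd :: _ => pvClosesFrom ev cd 0) = true

instance (raw_text : String) (anchor : Int) : Decidable (Pre_find_json_object_bounds_py raw_text anchor) := by
  unfold Pre_find_json_object_bounds_py; infer_instance

def pvWitness_find_json_object_bounds_py : String × Int := ("{\"a\": 1}", 3)

def Spec_find_json_object_bounds_py (raw_text : String) (anchor : Int) (out : Int × Int) : Prop := out = find_json_object_bounds_py_alt raw_text anchor
instance (raw_text : String) (anchor : Int) (out : Int × Int) : Decidable (Spec_find_json_object_bounds_py raw_text anchor out) := by unfold Spec_find_json_object_bounds_py; infer_instance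

-- ===== CLAIM (what is proved, stated in full; the proofs are below) =====
def Claim_equal_find_json_object_bounds_py : Prop := ∀ (raw_text : String) (anchor : Int), Dom_find_json_object_bounds_py raw_text anchor → Pre_find_json_object_bounds_py raw_text anchor → Spec_find_json_object_bounds_py raw_text anchor (find_json_object_bounds_py raw_text anchor)

-- ===== LEMMAS AND PROOFS =====

-- After the snapshot, B's scan with candidate cd computes exactly A's second pass,
-- with depth = number of stack entries strictly above cd, plus one.
lemma pvScan_phase2 (cs : List Char) : ∀ (index anchor cd : Int) (pref suff : List Int)
    (instr esc : Bool),
    cd < index → (∀ p ∈ pref, cd < p) → (∀ s ∈ suff, s < cd) →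
    pvScan cs index anchor (pref ++ cd :: suff) instr esc (some cd) =
      pvPass2 cs index cd ((pref.length : Int) + 1) instr esc := by
  induction cs with
  | nil =>
    intro index anchor cd pref suff instr esc h1 h2 h3
    simp [pvScan, pvPass2]
  | cons c rest ih =>
    intro index anchor cd pref suff instr esc h1 h2 h3
    have h1' : cd < index + 1 := by omega
    cases instr with
    | true =>
      cases esc with
      | true =>
        simpa [pvScan, pvPass2] using ih (index + 1) anchor cd pref suff true false h1' h2 h3
      | false =>
        by_cases hb : c = '\\'
        · subst hb
          simpa [pvScan, pvPass2] using ih (index + 1) anchor cd pref suff true true h1' h2 h3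
        · by_cases hq : c = '"'
          · subst hq
            simpa [pvScan, pvPass2] using ih (index + 1) anchor cd pref suff false false h1' h2 h3
          · simp only [pvScan, pvPass2, hb, hq, if_false, if_true]
            simpa [pvScan, pvPass2, hb, hq] using ih (index + 1) anchor cd pref suff true false h1' h2 h3
    | false =>
      by_cases hq : c = '"'
      · subst hq
        simpa [pvScan, pvPass2] using ih (index + 1) anchor cd pref suff true esc h1' h2 h3
      · by_cases ho : c = '{'
        · subst ho
          have h2' : ∀ p ∈ index :: pref, cd < p := by
            intro p hp; rcases List.mem_cons.mp hp with h | h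
            · omega
            · exact h2 p h
          have := ih (index + 1) anchor cd (index :: pref) suff false esc h1' h2' h3
          simp only [List.cons_append] at this
          simpa [pvScan, pvPass2, hq, Int.add_sub_cancel, push_cast] using this
        · by_cases hc : c = '}'
          · subst hc
            cases pref with
            | nil =>
              cases suff with
              | nil => simp [pvScan, pvPass2, hq]
              | cons s t =>
                have hs : s < cd := h3 s (by simp)
                simp [pvScan, pvPass2, hq, hs]
            | cons p ps =>
              have h2' : ∀ q ∈ ps, cd < q := fun q hqm => h2 q (by simp [hqm])
              have hrec := ih (index + 1) anchor cd ps suff false esc h1' h2' h3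
              cases ps with
              | nil =>
                simp only [pvScan, pvPass2, hq] at hrec ⊢
                simp
                simpa using hrec
              | cons q qs =>
                have hqcd : cd < q := h2' q (by simp)
                simp only [pvScan, pvPass2, hq] at hrec ⊢
                simp [show ¬(q < cd) by omega]
                simpa using hrec
          · simp only [pvScan, pvPass2, hq, ho, hc, if_false]
            simpa [pvScan, pvPass2, hq, ho, hc] using
              ih (index + 1) anchor cd pref suff false esc h1' h2 h3

-- Before the snapshot, B's scan computes A's result, given that every live '{' on the
-- stack would, if it became the start, make A's second pass agree with B's remaining scan.
lemma pvScan_phase1 (full : List Char) (cs : List Char) : ∀ (index anchor : Int)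
    (stack : List Int) (instr esc : Bool),
    cs = full.drop index.toNat → 0 ≤ index →
    (∀ s ∈ stack, s < index) →
    List.Pairwise (fun a b => b < a) stack →
    (instr = false → esc = false) →
    (∀ (pref suff : List Int) (cd : Int), stack = pref ++ cd :: suff →
      pvPass2 (full.drop cd.toNat) cd cd 0 false false =
        pvPass2 cs index cd ((pref.length : Int) + 1) instr esc) →
    pvScan cs index anchor stack instr esc none =
      (match pvPass1 cs index anchor stack instr esc with
       | [] => ((-1 : Int), (-1 : Int))
       | cd :: _ => pvPass2 (full.drop cd.toNat) cd cd 0 false false) := by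
  induction cs with
  | nil =>
    intro index anchor stack instr esc hcs hidx hlt hsorted hesc hinv
    cases stack with
    | nil => simp [pvScan, pvPass1]
    | cons cd t =>
      have := hinv [] t cd rfl
      simp [pvScan, pvPass1, this, pvPass2]
  | cons c rest ih =>
    intro index anchor stack instr esc hcs hidx hlt hsorted hesc hinv
    -- the remaining characters after this one
    have hrest : rest = full.drop (index + 1).toNat := by
      have h1 : (index + 1).toNat = index.toNat + 1 := by omega
      have h2 := congrArg List.tail hcs
      rw [List.tail_cons, List.tail_drop] at h2
      rw [h1]
      exact h2
    -- common closer: given the updated state and its invariants, both sides agree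
    have key : ∀ (stack' : List Int) (instr' esc' : Bool),
        (∀ s ∈ stack', s < index + 1) →
        List.Pairwise (fun a b => b < a) stack' →
        (instr' = false → esc' = false) →
        (∀ (pref suff : List Int) (cd : Int), stack' = pref ++ cd :: suff →
          pvPass2 (full.drop cd.toNat) cd cd 0 false false =
            pvPass2 rest (index + 1) cd ((pref.length : Int) + 1) instr' esc') →
        ((if anchor ≤ index then
            (match stack' with
             | [] => ((-1 : Int), (-1 : Int))
             | cd :: _ => pvScan rest (index + 1) anchor stack' instr' esc' (some cd))
          else pvScan rest (index + 1) anchor stack' instr' esc' none)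
         = (match (if anchor ≤ index then stack'
                   else pvPass1 rest (index + 1) anchor stack' instr' esc') with
            | [] => ((-1 : Int), (-1 : Int))
            | cd :: _ => pvPass2 (full.drop cd.toNat) cd cd 0 false false)) := by
      intro stack' instr' esc' hlt' hsorted' hesc' hinv'
      by_cases hb : anchor ≤ index
      · simp only [if_pos hb]
        cases stack' with
        | nil => rfl
        | cons cd t =>
          have hts : ∀ s ∈ t, s < cd := (List.pairwise_cons.mp hsorted').1
          have hp2 := pvScan_phase2 rest (index + 1) anchor cd [] t instr' esc'
            (hlt' cd (by simp)) (by simp) hts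
          have hi := hinv' [] t cd rfl
          simp only [List.nil_append] at hp2 hi
          simp [hp2]
          simpa using hi.symm
      · simp only [if_neg hb]
        exact ih (index + 1) anchor stack' instr' esc' hrest (by omega) hlt' hsorted' hesc' hinv'
    have hlt1 : ∀ s ∈ stack, s < index + 1 := fun s hs => by have := hlt s hs; omega
    cases instr with
    | true =>
      cases esc with
      | true =>
        have hinv' : ∀ (pref suff : List Int) (cd : Int), stack = pref ++ cd :: suff →
            pvPass2 (full.drop cd.toNat) cd cd 0 false false =
              pvPass2 rest (index + 1) cd ((pref.length : Int) + 1) true false := by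
          intro pref suff cd hdec
          rw [hinv pref suff cd hdec]
          simp [pvPass2]
        simpa [pvScan, pvPass1] using key stack true false hlt1 hsorted (by simp) hinv'
      | false =>
        by_cases hb : c = '\\'
        · subst hb
          have hinv' : ∀ (pref suff : List Int) (cd : Int), stack = pref ++ cd :: suff →
              pvPass2 (full.drop cd.toNat) cd cd 0 false false =
                pvPass2 rest (index + 1) cd ((pref.length : Int) + 1) true true := by
            intro pref suff cd hdec
            rw [hinv pref suff cd hdec]
            simp [pvPass2]
          simpa [pvScan, pvPass1] using key stack true true hlt1 hsorted (by simp) hinv'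
        · by_cases hq : c = '"'
          · subst hq
            have hinv' : ∀ (pref suff : List Int) (cd : Int), stack = pref ++ cd :: suff →
                pvPass2 (full.drop cd.toNat) cd cd 0 false false =
                  pvPass2 rest (index + 1) cd ((pref.length : Int) + 1) false false := by
              intro pref suff cd hdec
              rw [hinv pref suff cd hdec]
              simp [pvPass2]
            simpa [pvScan, pvPass1] using key stack false false hlt1 hsorted (fun _ => rfl) hinv'
          · have hinv' : ∀ (pref suff : List Int) (cd : Int), stack = pref ++ cd :: suff →
                pvPass2 (full.drop cd.toNat) cd cd 0 false false =
                  pvPass2 rest (index + 1) cd ((pref.length : Int) + 1) true false := by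
              intro pref suff cd hdec
              rw [hinv pref suff cd hdec]
              simp [pvPass2, hb, hq]
            simpa [pvScan, pvPass1, hb, hq] using key stack true false hlt1 hsorted (by simp) hinv'
    | false =>
      have he : esc = false := hesc rfl
      subst he
      by_cases hq : c = '"'
      · subst hq
        have hinv' : ∀ (pref suff : List Int) (cd : Int), stack = pref ++ cd :: suff →
            pvPass2 (full.drop cd.toNat) cd cd 0 false false =
              pvPass2 rest (index + 1) cd ((pref.length : Int) + 1) true false := by
          intro pref suff cd hdec
          rw [hinv pref suff cd hdec]
          simp [pvPass2]
        simpa [pvScan, pvPass1] using key stack true false hlt1 hsorted (by simp) hinv'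
      · by_cases ho : c = '{'
        · subst ho
          have hlt' : ∀ s ∈ index :: stack, s < index + 1 := by
            intro s hs
            rcases List.mem_cons.mp hs with h | h
            · omega
            · have := hlt s h; omega
          have hsorted' : List.Pairwise (fun a b => b < a) (index :: stack) :=
            List.pairwise_cons.mpr ⟨hlt, hsorted⟩
          have hinv' : ∀ (pref suff : List Int) (cd : Int), index :: stack = pref ++ cd :: suff →
              pvPass2 (full.drop cd.toNat) cd cd 0 false false =
                pvPass2 rest (index + 1) cd ((pref.length : Int) + 1) false false := by
            intro pref suff cd hdec
            cases pref with
            | nil =>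
              simp only [List.nil_append] at hdec
              injection hdec with e1 e2
              subst e1
              rw [← hcs]
              simp [pvPass2]
            | cons p ps =>
              simp only [List.cons_append] at hdec
              injection hdec with e1 e2
              rw [hinv ps suff cd e2]
              simp only [pvPass2, List.length_cons]
              push_cast
              ring_nf
          simpa [pvScan, pvPass1] using key (index :: stack) false false hlt' hsorted' (fun _ => rfl) hinv'
        · by_cases hc : c = '}'
          · subst hc
            cases stack with
            | nil =>
              have hinv' : ∀ (pref suff : List Int) (cd : Int), ([] : List Int) = pref ++ cd :: suff →
                  pvPass2 (full.drop cd.toNat) cd cd 0 false false =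
                    pvPass2 rest (index + 1) cd ((pref.length : Int) + 1) false false := by
                intro pref suff cd hdec
                exact absurd hdec (by simp)
              simpa [pvScan, pvPass1] using key [] false false (by simp) (by simp) (fun _ => rfl) hinv'
            | cons h t =>
              have hsorted' : List.Pairwise (fun a b => b < a) t := (List.pairwise_cons.mp hsorted).2
              have hlt' : ∀ s ∈ t, s < index + 1 := by
                intro s hs; have := hlt s (by simp [hs]); omega
              have hinv' : ∀ (pref suff : List Int) (cd : Int), t = pref ++ cd :: suff →
                  pvPass2 (full.drop cd.toNat) cd cd 0 false false =
                    pvPass2 rest (index + 1) cd ((pref.length : Int) + 1) false false := by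
                intro pref suff cd hdec
                have hd2 : h :: t = (h :: pref) ++ cd :: suff := by simp [hdec]
                rw [hinv (h :: pref) suff cd hd2,
                  show (((h :: pref).length : Int) + 1) = ((pref.length : Int) + 1) + 1 from by
                    simp only [List.length_cons]; push_cast; ring]
                simp [pvPass2,
                  show ((pref.length : Int) + 1) + 1 - 1 = (pref.length : Int) + 1 from by omega]
                intro hzero
                exact absurd hzero (by omega)
              simpa [pvScan, pvPass1] using key t false false hlt' hsorted' (fun _ => rfl) hinv'
          · have hinv' : ∀ (pref suff : List Int) (cd : Int), stack = pref ++ cd :: suff →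
                pvPass2 (full.drop cd.toNat) cd cd 0 false false =
                  pvPass2 rest (index + 1) cd ((pref.length : Int) + 1) false false := by
              intro pref suff cd hdec
              rw [hinv pref suff cd hdec]
              simp [pvPass2, hq, ho, hc]
            simpa [pvScan, pvPass1, hq, ho, hc] using key stack false false hlt1 hsorted (fun _ => rfl) hinv'
lemma pv_find_eq (raw_text : String) (anchor : Int) :
    find_json_object_bounds_py raw_text anchor = find_json_object_bounds_py_alt raw_text anchor := by
  have h := pvScan_phase1 raw_text.toList raw_text.toList 0 anchor [] false false
    (by simp) le_rfl (by simp) (by simp) (fun _ => rfl)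
    (fun pref suff cd hdec => absurd hdec (by simp))
  unfold find_json_object_bounds_py find_json_object_bounds_py_alt
  exact h.symm

-- ===== VERDICT (by name: the statement is the Claim_ definition above) =====
theorem find_json_object_bounds_py_spec : Claim_equal_find_json_object_bounds_py := by
  intro raw_text anchor _ _
  unfold Spec_find_json_object_bounds_py
  exact pv_find_eq raw_text anchor
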